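-- pv_equiv track=rewrite | github.com/CipherOcto/cipherocto | scripts/compute_dlae_probe_root.py | canonicalize_dqa
-- ===== SOURCE A (Python) =====
-- from typing import List, Tuple, Optional
--
-- def canonicalize_dqa(value: int, scale: int) -> Tuple[int, int]:
--     """
--     Canonicalize DQA value per RFC-0105 §Canonical Representation.
--     Strip trailing zeros from the value, adjusting scale accordingly.
--     """
--     if value == 0:
--         return (0, 0)
--     v = value
--     s = scale
--     while v % 10 == 0 and s > 0:
--         v //= 10
--         s -= 1
--     return (v, s)
-- ===== SOURCE B (Python) =====
-- def canonicalize_dqa(value, scale):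
--     """
--     Canonicalize DQA value per RFC-0105 (Canonical Representation).
--     Computes the number of trailing zero digits to strip as the minimum of the
--     2-adic and 5-adic valuations of value, capped by the (non-negative part of)
--     scale, then strips them with a single power-of-ten division.
--     """
--     if value == 0:
--         return (0, 0)
--     strip = min(_valuation(value, 2), _valuation(value, 5), max(scale, 0))
--     return (value // 10 ** strip, scale - strip)
--
--
-- def _valuation(n, p):
--     """p-adic valuation of n; the extra guards keep it total for any inputs."""
--     k = 0
--     while n % p == 0 and n != 0 and p >= 2:
--         n //= p
--         k += 1
--     return k
-- ===== Notes on version B (the rewrite author's own statement) =====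
-- stated objective: alternative
-- what changed: Instead of repeatedly dividing value by 10 while decrementing scale, B computes the strip count once as the minimum of the 2-adic and 5-adic valuations of value capped by max(scale,0), and strips all trailing zeros with a single power-of-ten division.
import Mathlib
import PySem

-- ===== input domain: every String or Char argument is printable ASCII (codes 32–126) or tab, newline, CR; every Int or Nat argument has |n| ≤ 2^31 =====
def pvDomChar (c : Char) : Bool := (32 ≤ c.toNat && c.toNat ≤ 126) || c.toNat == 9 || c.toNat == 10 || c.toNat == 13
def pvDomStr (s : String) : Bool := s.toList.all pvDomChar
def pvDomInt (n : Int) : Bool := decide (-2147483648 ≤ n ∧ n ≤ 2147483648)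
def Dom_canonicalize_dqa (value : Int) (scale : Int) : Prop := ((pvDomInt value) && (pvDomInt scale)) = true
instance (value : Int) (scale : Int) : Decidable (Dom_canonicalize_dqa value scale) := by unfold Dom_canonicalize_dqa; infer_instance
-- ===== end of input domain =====

-- B computes the strip count as min of the 2- and 5-adic valuations capped by scale and
-- divides once by that power of ten, instead of A's digit-by-digit stripping loop (alternative).


-- ===== PORT A =====
-- the 'while v % 10 == 0 and s > 0' loop of A (state (v, s)); terminates since s decreases
def canonLoop (v : Int) (s : Int) : Int × Int :=
  if h : PySem.Int.mod v 10 = 0 ∧ 0 < s then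
    canonLoop (PySem.Int.floordiv v 10) (s - 1)
  else (v, s)
termination_by s.toNat
decreasing_by omega

def canonicalize_dqa (value : Int) (scale : Int) : Int × Int :=
  if value = 0 then (0, 0) else canonLoop value scale

-- ===== PORT B =====
-- Source B's _valuation(n, p): 'while n % p == 0 and n != 0 and p >= 2', accumulator k
def valLoop (n : Int) (p : Int) (k : Int) : Int :=
  if h : PySem.Int.mod n p = 0 ∧ n ≠ 0 ∧ 2 ≤ p then
    valLoop (PySem.Int.floordiv n p) p (k + 1)
  else k
termination_by n.natAbs
decreasing_by
  · obtain ⟨h0, hn, hp⟩ := h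
    rw [PySem.Int.floordiv_eq_ediv_of_pos (by omega)]
    have hdvd : p ∣ n := (PySem.Int.mod_eq_zero_iff_dvd n p).1 h0
    obtain ⟨t, rfl⟩ := hdvd
    rw [Int.mul_ediv_cancel_left t (by omega)]
    have ht : t ≠ 0 := by rintro rfl; simp at hn
    have : 1 ≤ t.natAbs := by omega
    calc t.natAbs < 2 * t.natAbs := by omega
      _ ≤ p.natAbs * t.natAbs := Nat.mul_le_mul_right _ (by omega)
      _ = (p * t).natAbs := (Int.natAbs_mul p t).symm

-- 10 ** strip with strip = min(valuations, max(scale,0)) ≥ 0, ported as 10 ^ strip.toNat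
def canonicalize_dqa_alt (value : Int) (scale : Int) : Int × Int :=
  if value = 0 then (0, 0)
  else
    let strip : Int := min (min (valLoop value 2 0) (valLoop value 5 0)) (max scale 0)
    (PySem.Int.floordiv value (10 ^ strip.toNat), scale - strip)

-- ===== PRECONDITION & SPEC =====
def Spec_canonicalize_dqa (value : Int) (scale : Int) (out : Int × Int) : Prop := out = canonicalize_dqa_alt value scale
instance (value : Int) (scale : Int) (out : Int × Int) : Decidable (Spec_canonicalize_dqa value scale out) := by unfold Spec_canonicalize_dqa; infer_instance

-- ===== CLAIM (what is proved, stated in full; the proofs are below) =====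
def Claim_equal_canonicalize_dqa : Prop := ∀ (value : Int) (scale : Int), Dom_canonicalize_dqa value scale → Spec_canonicalize_dqa value scale (canonicalize_dqa value scale)

-- ===== LEMMAS AND PROOFS =====

-- accumulator shift for valLoop
theorem valLoop_shift (n p k : Int) : valLoop n p (k + 1) = valLoop n p k + 1 := by
  fun_induction valLoop n p k with
  | case1 a b h ih =>
    rw [valLoop, dif_pos h]
    exact ih
  | case2 a b h =>
    rw [valLoop, dif_neg h]

-- spec of valLoop: exact p-adic valuation (strong induction on |n| via a bound N)
theorem valLoop_spec_aux (p : Int) (hp : 2 ≤ p) :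
    ∀ (N : Nat) (n : Int), n.natAbs ≤ N → n ≠ 0 →
    0 ≤ valLoop n p 0 ∧ p ^ (valLoop n p 0).toNat ∣ n ∧ ¬ p ^ ((valLoop n p 0).toNat + 1) ∣ n := by
  intro N
  induction N with
  | zero => intro n hN hn; exact absurd (by omega : n = 0) hn
  | succ N ih =>
    intro n hN hn
    rw [valLoop]
    by_cases hdvd : p ∣ n
    · have hmod : PySem.Int.mod n p = 0 := (PySem.Int.mod_eq_zero_iff_dvd n p).2 hdvd
      rw [dif_pos ⟨hmod, hn, hp⟩]
      obtain ⟨t, rfl⟩ := hdvd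
      have hfd : PySem.Int.floordiv (p * t) p = t := by
        rw [PySem.Int.floordiv_eq_ediv_of_pos (by omega)]
        exact Int.mul_ediv_cancel_left t (by omega)
      have ht : t ≠ 0 := by rintro rfl; simp at hn
      have htN : t.natAbs ≤ N := by
        have h1 : (p * t).natAbs = p.natAbs * t.natAbs := Int.natAbs_mul p t
        have h2 : 2 ≤ p.natAbs := by omega
        have h3 : 1 ≤ t.natAbs := by omega
        nlinarith
      obtain ⟨c0, cdvd, cnd⟩ := ih t htN ht
      rw [hfd, show (0:Int) + 1 = 0 + 1 from rfl, valLoop_shift]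
      have htn : (valLoop t p 0 + 1).toNat = (valLoop t p 0).toNat + 1 := by omega
      refine ⟨by omega, ?_, ?_⟩
      · rw [htn, pow_succ']
        exact mul_dvd_mul_left p cdvd
      · rw [htn]
        intro hcon
        apply cnd
        rw [pow_succ'] at hcon
        exact (mul_dvd_mul_iff_left (show (p:Int) ≠ 0 by omega)).1 hcon
    · have hmod : PySem.Int.mod n p ≠ 0 := fun h => hdvd ((PySem.Int.mod_eq_zero_iff_dvd n p).1 h)
      rw [dif_neg (by tauto)]
      exact ⟨le_refl 0, by simp, by simpa using hdvd⟩

theorem valLoop_spec (n p : Int) (hp : 2 ≤ p) (hn : n ≠ 0) :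
    0 ≤ valLoop n p 0 ∧ p ^ (valLoop n p 0).toNat ∣ n ∧ ¬ p ^ ((valLoop n p 0).toNat + 1) ∣ n :=
  valLoop_spec_aux p hp n.natAbs n (le_refl _) hn

-- characterization of A's loop in terms of the exact 10-adic valuation
theorem canonLoop_char_aux :
    ∀ (S : Nat) (s : Int), s.toNat ≤ S → ∀ (d : Nat) (v : Int), v ≠ 0 →
    (10:Int) ^ d ∣ v → ¬ (10:Int) ^ (d + 1) ∣ v →
    canonLoop v s = (PySem.Int.floordiv v (10 ^ (min d s.toNat)), s - min d s.toNat) := by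
  intro S
  induction S with
  | zero =>
    intro s hS d v hv hd1 hd2
    have hs : ¬ 0 < s := by omega
    rw [canonLoop, dif_neg (by tauto)]
    have : min d s.toNat = 0 := by omega
    rw [this]
    simp
  | succ S ih =>
    intro s hS d v hv hd1 hd2
    by_cases hs : 0 < s
    · by_cases hmod : PySem.Int.mod v 10 = 0
      · rw [canonLoop, dif_pos ⟨hmod, hs⟩]
        have hdvd : (10:Int) ∣ v := (PySem.Int.mod_eq_zero_iff_dvd v 10).1 hmod
        obtain ⟨w, rfl⟩ := hdvd
        have hw : w ≠ 0 := by rintro rfl; simp at hv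
        have hfd : PySem.Int.floordiv (10 * w) 10 = w := by
          rw [PySem.Int.floordiv_eq_ediv_of_pos (by omega)]
          exact Int.mul_ediv_cancel_left w (by omega)
        have hd0 : d ≠ 0 := by
          rintro rfl
          exact hd2 (by simp)
        obtain ⟨d', rfl⟩ : ∃ d', d = d' + 1 := ⟨d - 1, by omega⟩
        have hd1' : (10:Int) ^ d' ∣ w := by
          rw [pow_succ'] at hd1
          exact (mul_dvd_mul_iff_left (show (10:Int) ≠ 0 by omega)).1 hd1
        have hd2' : ¬ (10:Int) ^ (d' + 1) ∣ w := by
          intro hcon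
          apply hd2
          rw [pow_succ']
          exact mul_dvd_mul_left 10 hcon
        rw [hfd, ih (s - 1) (by omega) d' w hw hd1' hd2']
        have hmin : min (d' + 1) s.toNat = min d' (s - 1).toNat + 1 := by omega
        have hdiv : PySem.Int.floordiv (10 * w) (10 ^ min (d' + 1) s.toNat)
            = PySem.Int.floordiv w (10 ^ min d' (s - 1).toNat) := by
          rw [hmin, pow_succ',
            PySem.Int.floordiv_eq_ediv_of_pos (by positivity),
            PySem.Int.floordiv_eq_ediv_of_pos (by positivity)]
          exact Int.mul_ediv_mul_of_pos w _ (by omega)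
        rw [hdiv]
        refine Prod.ext rfl ?_
        simp only
        omega
      · rw [canonLoop, dif_neg (by tauto)]
        have hd0 : d = 0 := by
          by_contra hd0
          apply hmod
          apply (PySem.Int.mod_eq_zero_iff_dvd v 10).2
          calc (10:Int) ∣ 10 ^ d := dvd_pow_self 10 hd0
            _ ∣ v := hd1
        rw [hd0]
        have : min 0 s.toNat = 0 := by omega
        rw [this]
        simp
    · rw [canonLoop, dif_neg (by tauto)]
      have : min d s.toNat = 0 := by omega
      rw [this]
      simp

theorem canonLoop_char (d : Nat) (v s : Int) (hv : v ≠ 0)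
    (hd1 : (10:Int) ^ d ∣ v) (hd2 : ¬ (10:Int) ^ (d + 1) ∣ v) :
    canonLoop v s = (PySem.Int.floordiv v (10 ^ (min d s.toNat)), s - min d s.toNat) :=
  canonLoop_char_aux s.toNat s (le_refl _) d v hv hd1 hd2

-- ===== VERDICT (by name: the statement is the Claim_ definition above) =====
theorem canonicalize_dqa_spec : Claim_equal_canonicalize_dqa := by
  intro value scale _
  unfold Spec_canonicalize_dqa canonicalize_dqa canonicalize_dqa_alt
  by_cases hv : value = 0
  · simp [hv]
  · simp only [if_neg hv]
    obtain ⟨h20, h2d, h2n⟩ := valLoop_spec value 2 (by omega) hv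
    obtain ⟨h50, h5d, h5n⟩ := valLoop_spec value 5 (by omega) hv
    set k2 := valLoop value 2 0 with hk2
    set k5 := valLoop value 5 0 with hk5
    set d : Nat := (min k2 k5).toNat with hd
    have hcop : IsCoprime ((2:Int) ^ d) ((5:Int) ^ d) :=
      (Int.isCoprime_iff_gcd_eq_one.mpr (by decide)).pow
    have hd1 : (10:Int) ^ d ∣ value := by
      have h2 : (2:Int) ^ d ∣ value :=
        dvd_trans (pow_dvd_pow 2 (by omega)) h2d
      have h5 : (5:Int) ^ d ∣ value :=
        dvd_trans (pow_dvd_pow 5 (by omega)) h5d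
      have := hcop.mul_dvd h2 h5
      rwa [show ((2:Int) ^ d * 5 ^ d) = 10 ^ d by rw [← mul_pow]; norm_num] at this
    have hd2 : ¬ (10:Int) ^ (d + 1) ∣ value := by
      intro hcon
      rcases le_total k2 k5 with hle | hle
      · apply h2n
        have hdk : d = k2.toNat := by omega
        calc (2:Int) ^ (k2.toNat + 1) ∣ 10 ^ (k2.toNat + 1) :=
              pow_dvd_pow_of_dvd ⟨5, by norm_num⟩ _
          _ ∣ value := by rwa [hdk] at hcon
      · apply h5n
        have hdk : d = k5.toNat := by omega
        calc (5:Int) ^ (k5.toNat + 1) ∣ 10 ^ (k5.toNat + 1) :=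
              pow_dvd_pow_of_dvd ⟨2, by norm_num⟩ _
          _ ∣ value := by rwa [hdk] at hcon
    rw [canonLoop_char d value scale hv hd1 hd2]
    have hstrip : (min (min k2 k5) (max scale 0)).toNat = min d scale.toNat := by omega
    have hstrip2 : (min (min k2 k5) (max scale 0)) = ((min d scale.toNat : Nat) : Int) := by omega
    rw [hstrip, hstrip2]
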